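-- pv_equiv track=rewrite | github.com/chohan3036/algo_study | Greedy/42860_조이스틱.py | solution
-- ===== SOURCE A (Python) =====
-- def solution(name):
--     # 우선 cnt 리스트에 위아래 조작 횟수만 넣어놓음
--     ans = 0
--     name = list(name)
--     idx = 0
--     # 왼오 조작?
--     while True:
--         left, right = 1, 1
--         if name[idx] != 'A':
--             ans += min(ord(name[idx]) - ord('A'), ord('Z') - ord(name[idx]) + 1)
--             name[idx] = 'A'
--         if name == ['A'] * len(name):
--             break
--         for i in range(1, len(name)):
--             if name[idx + i] == 'A':
--                 right += 1
--             else: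
--                 break
--
--         for i in range(1, len(name)):
--             if name[idx - i] == 'A':
--                 left += 1
--             else:
--                 break
--
--         if left >= right:
--             ans += right
--             idx += right
--         else:
--             ans += left
--             idx -= left
--
--     return ans
-- ===== SOURCE B (Python) =====
-- def solution(name):
--     # O(n) two-pointer greedy: collect non-'A' positions once; the remaining targets,
--     # read clockwise from the cursor, are exactly D[lo..hi]; move to whichever end is nearer.
--     n = len(name)
--     ans = 0
--     D = []
--     for i, c in enumerate(name):
--         if c != 'A':
--             ans += min(ord(c) - ord('A'), ord('Z') - ord(c) + 1)
--             D.append(i)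
--     cur = 0
--     lo, hi = 0, len(D) - 1
--     if lo <= hi and D[lo] == 0:
--         lo += 1
--     while lo <= hi:
--         r = (D[lo] - cur) % n
--         l = (cur - D[hi]) % n
--         if l >= r:
--             ans += r
--             cur = D[lo]
--             lo += 1
--         else:
--             ans += l
--             cur = D[hi]
--             hi -= 1
--     return ans
-- ===== Notes on version B (the rewrite author's own statement) =====
-- stated objective: faster
-- what changed: B collects the non-'A' positions (and their summed up/down costs) once into an array and runs the greedy with two pointers on that array's ends, removing A's per-iteration whole-string rescans and all-'A' equality check.
import Mathlib
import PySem

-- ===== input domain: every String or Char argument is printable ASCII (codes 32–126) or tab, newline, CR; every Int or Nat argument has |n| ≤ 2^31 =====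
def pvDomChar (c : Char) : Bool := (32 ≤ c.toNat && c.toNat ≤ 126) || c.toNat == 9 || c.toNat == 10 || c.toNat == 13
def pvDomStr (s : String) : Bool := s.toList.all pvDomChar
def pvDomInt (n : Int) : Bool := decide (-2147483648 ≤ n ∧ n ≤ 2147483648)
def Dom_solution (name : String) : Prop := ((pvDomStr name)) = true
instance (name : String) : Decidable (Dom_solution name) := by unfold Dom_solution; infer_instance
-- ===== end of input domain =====

-- B replaces A's per-iteration whole-string rescans by a one-pass array of non-'A' positions
-- walked with two pointers: equal on every nonempty string (objective: faster).

-- up/down cost of one character: min(ord(c)-ord('A'), ord('Z')-ord(c)+1), the expression both sources contain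
def vcost (c : Char) : Int :=
  min ((c.toNat : Int) - ('A'.toNat : Int)) (('Z'.toNat : Int) - (c.toNat : Int) + 1)

-- ===== PORT A =====
def rightScanA (nm : List Char) (idx : Int) : List Int → Int → Option Int
  | [], acc => some acc
  | i :: rest, acc =>
    match PySem.List.pyGet? nm (idx + i) with
    | none => none
    | some c => if c = 'A' then rightScanA nm idx rest (acc + 1) else some acc

def leftScanA (nm : List Char) (idx : Int) : List Int → Int → Option Int
  | [], acc => some acc
  | i :: rest, acc =>
    match PySem.List.pyGet? nm (idx - i) with
    | none => none
    | some c => if c = 'A' then leftScanA nm idx rest (acc + 1) else some acc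

def loopA : Nat → List Char → Int → Int → Option Int
  | 0, _, _, _ => none
  | fuel + 1, nm, idx, ans =>
    match PySem.List.pyGet? nm idx with
    | none => none
    | some c =>
      let nm' := if c ≠ 'A' then PySem.List.pySetD nm idx 'A' else nm
      let ans' := if c ≠ 'A' then ans + vcost c else ans
      if nm' = List.replicate nm'.length 'A' then some ans'
      else
        match rightScanA nm' idx (PySem.List.pyRange 1 (nm'.length : Int) 1) 1,
              leftScanA nm' idx (PySem.List.pyRange 1 (nm'.length : Int) 1) 1 with
        | some right, some left =>
          if left ≥ right then loopA fuel nm' (idx + right) (ans' + right)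
          else loopA fuel nm' (idx - left) (ans' + left)
        | _, _ => none

def solution (name : String) : Int :=
  (loopA (name.toList.length + 2) name.toList 0 0).getD 0

-- ===== PORT B =====
def collectB : List Char → Nat → Int × List Int
  | [], _ => (0, [])
  | c :: rest, i =>
    let p := collectB rest (i + 1)
    if c ≠ 'A' then (vcost c + p.1, (i : Int) :: p.2) else p

def loopB (n : Int) : Nat → List Int → Int → Int → Int
  | 0, _, _, ans => ans
  | fuel + 1, D, cur, ans =>
    match D with
    | [] => ans
    | q :: rest =>
      let r := PySem.Int.mod (q - cur) n
      let last := (q :: rest).getLast (List.cons_ne_nil q rest)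
      let l := PySem.Int.mod (cur - last) n
      if l ≥ r then loopB n fuel rest q (ans + r)
      else loopB n fuel (q :: rest).dropLast last (ans + l)

def solution_alt (name : String) : Int :=
  let p := collectB name.toList 0
  let D1 := if p.2.head? = some 0 then p.2.tail else p.2
  loopB (name.toList.length : Int) D1.length D1 0 p.1

-- ===== PRECONDITION & SPEC =====
-- Pre_ excludes only the empty string, on which A raises IndexError (name[0] on an empty list)
def Pre_solution (name : String) : Prop := name ≠ ""
instance (name : String) : Decidable (Pre_solution name) := by unfold Pre_solution; infer_instance
def pvWitness_solution : String := "JAZ"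

def Spec_solution (name : String) (out : Int) : Prop := out = solution_alt name
instance (name : String) (out : Int) : Decidable (Spec_solution name out) := by unfold Spec_solution; infer_instance

-- ===== CLAIM (what is proved, stated in full; the proofs are below) =====
def Claim_equal_solution : Prop := ∀ (name : String), Dom_solution name → Pre_solution name → Spec_solution name (solution name)

-- ===== LEMMAS AND PROOFS =====
theorem getElem?_eq_some_getD {nm : List Char} {p : Nat} (h : p < nm.length) :
    nm[p]? = some (nm.getD p 'A') := by
  rw [List.getElem?_eq_getElem h, List.getD_eq_getElem nm 'A' h]

theorem mod_small {a n : Int} (h1 : 0 ≤ a) (h2 : a < n) : PySem.Int.mod a n = a := by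
  rw [PySem.Int.mod_eq_emod_of_pos (by omega)]; exact Int.emod_eq_of_lt h1 h2

theorem mod_negv {a n : Int} (h1 : -n ≤ a) (h2 : a < 0) : PySem.Int.mod a n = a + n := by
  rw [PySem.Int.mod_eq_emod_of_pos (by omega)]
  have h3 : (a + n) % n = a + n := Int.emod_eq_of_lt (by omega) (by omega)
  rw [← Int.add_mul_emod_self_left (a := a) (b := n) (c := 1), mul_one, h3]

theorem pyIdx_win {len : Nat} {idx : Int} (h1 : -(len:Int) ≤ idx) (h2 : idx < len) :
    PySem.List.pyIdx? len idx = some (PySem.Int.mod idx len).toNat := by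
  by_cases h : 0 ≤ idx
  · rw [mod_small h h2]; simp [PySem.List.pyIdx?, h, h2]
  · rw [mod_negv h1 (by omega)]
    simp only [PySem.List.pyIdx?, if_neg h, if_pos h1]
    congr 1; omega

theorem pyGet_win {nm : List Char} {idx : Int} (h1 : -(nm.length:Int) ≤ idx) (h2 : idx < nm.length) :
    PySem.List.pyGet? nm idx = nm[(PySem.Int.mod idx nm.length).toNat]? := by
  simp [PySem.List.pyGet?, pyIdx_win h1 h2]

theorem pySetD_win {nm : List Char} {idx : Int} {v : Char} (h1 : -(nm.length:Int) ≤ idx) (h2 : idx < nm.length) :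
    PySem.List.pySetD nm idx v = nm.set (PySem.Int.mod idx nm.length).toNat v := by
  simp [PySem.List.pySetD, PySem.List.pySet?, pyIdx_win h1 h2]

theorem sorted_le_getLast {l : List Int} (h : List.Pairwise (· < ·) l) (hne : l ≠ []) :
    ∀ q ∈ l, q ≤ l.getLast hne := by
  intro q hq
  have hsplit : l.dropLast ++ [l.getLast hne] = l := List.dropLast_append_getLast hne
  rw [← hsplit] at h hq
  rcases List.mem_append.mp hq with hq' | hq'
  · have := (List.pairwise_append.mp h).2.2 q hq' (l.getLast hne) (by simp)
    omega
  · simp at hq'; omega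

theorem rightScan_aux (nm : List Char) (idx q1 : Int) (hlt : q1 - idx < nm.length)
    (c : Char) (hHitc : PySem.List.pyGet? nm q1 = some c) (hcne : c ≠ 'A')
    (hA : ∀ i : Int, 1 ≤ i → i < q1 - idx → PySem.List.pyGet? nm (idx + i) = some 'A') :
    ∀ (k : Nat) (i0 : Int), (q1 - idx - i0).toNat = k → 1 ≤ i0 → i0 ≤ q1 - idx →
    rightScanA nm idx (PySem.List.pyRange i0 (nm.length : Int) 1) i0 = some (q1 - idx) := by
  intro k
  induction k with
  | zero =>
    intro i0 hk h1 h2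
    have hi0 : i0 = q1 - idx := by omega
    subst hi0
    rw [PySem.List.pyRange_one_cons (by omega)]
    have : idx + (q1 - idx) = q1 := by ring
    simp only [rightScanA, this, hHitc, if_neg hcne]
  | succ k ih =>
    intro i0 hk h1 h2
    have hlt' : i0 < q1 - idx := by omega
    rw [PySem.List.pyRange_one_cons (by omega)]
    simp only [rightScanA, hA i0 h1 hlt']
    exact ih (i0 + 1) (by omega) (by omega) (by omega)

theorem leftScan_aux (nm : List Char) (idx L : Int) (hlt : L < nm.length)
    (c : Char) (hHitc : PySem.List.pyGet? nm (idx - L) = some c) (hcne : c ≠ 'A')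
    (hA : ∀ i : Int, 1 ≤ i → i < L → PySem.List.pyGet? nm (idx - i) = some 'A') :
    ∀ (k : Nat) (i0 : Int), (L - i0).toNat = k → 1 ≤ i0 → i0 ≤ L →
    leftScanA nm idx (PySem.List.pyRange i0 (nm.length : Int) 1) i0 = some L := by
  intro k
  induction k with
  | zero =>
    intro i0 hk h1 h2
    have hi0 : i0 = L := by omega
    subst hi0
    rw [PySem.List.pyRange_one_cons (by omega)]
    simp only [leftScanA, hHitc, if_neg hcne]
  | succ k ih =>
    intro i0 hk h1 h2
    have hlt' : i0 < L := by omega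
    rw [PySem.List.pyRange_one_cons (by omega)]
    simp only [leftScanA, hA i0 h1 hlt']
    exact ih (i0 + 1) (by omega) (by omega) (by omega)

theorem rightScan_run (nm : List Char) (idx lo hi q1 : Int) (rest : List Int)
    (hlo : lo ≤ 0) (hhi : 0 ≤ hi) (harc : hi - lo < nm.length) (hidx : idx = lo ∨ idx = hi)
    (hsort : List.Pairwise (· < ·) (q1 :: rest))
    (hwin : ∀ q ∈ q1 :: rest, hi < q ∧ q < lo + nm.length)
    (hchr : ∀ j : Nat, j < nm.length → (nm.getD j 'A' ≠ 'A' ↔ (j : Int) ∈ q1 :: rest)) :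
    rightScanA nm idx (PySem.List.pyRange 1 (nm.length : Int) 1) 1 = some (q1 - idx) := by
  have hq1 := hwin q1 (by simp)
  have hidxle : idx ≤ hi := by rcases hidx with h | h <;> omega
  have hidxge : lo ≤ idx := by rcases hidx with h | h <;> omega
  have hr1 : 1 ≤ q1 - idx := by omega
  have hrn : q1 - idx < (nm.length : Int) := by rcases hidx with h | h <;> omega
  have hmin : ∀ q ∈ q1 :: rest, q1 ≤ q := by
    intro q hq
    rcases List.mem_cons.mp hq with h | h
    · omega
    · have := (List.pairwise_cons.mp hsort).1 q h; omega
  have hq1nat : ((q1.toNat : Int)) = q1 := Int.toNat_of_nonneg (by omega)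
  have hq1lt : q1.toNat < nm.length := by omega
  have hHit : PySem.List.pyGet? nm q1 = some (nm.getD q1.toNat 'A') := by
    rw [PySem.List.pyGet?_of_nonneg nm (by omega), getElem?_eq_some_getD hq1lt]
  have hcne : nm.getD q1.toNat 'A' ≠ 'A' := by
    rw [hchr q1.toNat hq1lt, hq1nat]; simp
  have hA : ∀ i : Int, 1 ≤ i → i < q1 - idx → PySem.List.pyGet? nm (idx + i) = some 'A' := by
    intro i h1 h2
    have he1 : -(nm.length : Int) ≤ idx + i := by omega
    have he2 : idx + i < (nm.length : Int) := by omega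
    rw [pyGet_win he1 he2]
    by_cases hpos : 0 ≤ idx + i
    · rw [mod_small hpos he2]
      have hp : (idx + i).toNat < nm.length := by omega
      rw [getElem?_eq_some_getD hp]
      have : nm.getD (idx + i).toNat 'A' = 'A' := by
        by_contra hne
        have := hmin _ ((hchr _ hp).mp hne)
        omega
      rw [this]
    · rw [mod_negv he1 (by omega)]
      have hp : (idx + i + nm.length).toNat < nm.length := by omega
      rw [getElem?_eq_some_getD hp]
      have : nm.getD (idx + i + nm.length).toNat 'A' = 'A' := by
        by_contra hne
        have hmem := (hchr _ hp).mp hne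
        have := (hwin _ hmem).2
        omega
      rw [this]
  exact rightScan_aux nm idx q1 (by omega) _ hHit hcne hA (q1 - idx - 1).toNat 1 (by omega) le_rfl hr1

theorem leftScan_run (nm : List Char) (idx lo hi q1 : Int) (rest : List Int)
    (hlo : lo ≤ 0) (hhi : 0 ≤ hi) (harc : hi - lo < nm.length) (hidx : idx = lo ∨ idx = hi)
    (hsort : List.Pairwise (· < ·) (q1 :: rest))
    (hwin : ∀ q ∈ q1 :: rest, hi < q ∧ q < lo + nm.length)
    (hchr : ∀ j : Nat, j < nm.length → (nm.getD j 'A' ≠ 'A' ↔ (j : Int) ∈ q1 :: rest)) :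
    leftScanA nm idx (PySem.List.pyRange 1 (nm.length : Int) 1) 1 =
      some (idx - (q1 :: rest).getLast (List.cons_ne_nil q1 rest) + nm.length) := by
  set qm := (q1 :: rest).getLast (List.cons_ne_nil q1 rest) with hqmdef
  have hqmmem : qm ∈ q1 :: rest := List.getLast_mem _
  have hqm := hwin qm hqmmem
  have hmax := sorted_le_getLast hsort (List.cons_ne_nil q1 rest)
  have hidxle : idx ≤ hi := by rcases hidx with h | h <;> omega
  have hidxge : lo ≤ idx := by rcases hidx with h | h <;> omega
  set L := idx - qm + (nm.length : Int) with hL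
  have hL1 : 1 ≤ L := by omega
  have hLn : L < (nm.length : Int) := by omega
  have hqmlt : qm.toNat < nm.length := by omega
  have hqmnat : ((qm.toNat : Int)) = qm := Int.toNat_of_nonneg (by omega)
  have hHit : PySem.List.pyGet? nm (idx - L) = some (nm.getD qm.toNat 'A') := by
    have he1 : -(nm.length : Int) ≤ idx - L := by omega
    have he2 : idx - L < 0 := by omega
    rw [pyGet_win he1 (by omega), mod_negv he1 he2]
    have : idx - L + (nm.length : Int) = qm := by omega
    rw [this, getElem?_eq_some_getD hqmlt]
  have hcne : nm.getD qm.toNat 'A' ≠ 'A' := by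
    rw [hchr qm.toNat hqmlt, hqmnat]; exact hqmmem
  have hA : ∀ i : Int, 1 ≤ i → i < L → PySem.List.pyGet? nm (idx - i) = some 'A' := by
    intro i h1 h2
    have he1 : -(nm.length : Int) ≤ idx - i := by omega
    have he2 : idx - i < (nm.length : Int) := by omega
    rw [pyGet_win he1 he2]
    by_cases hpos : 0 ≤ idx - i
    · rw [mod_small hpos he2]
      have hp : (idx - i).toNat < nm.length := by omega
      rw [getElem?_eq_some_getD hp]
      have : nm.getD (idx - i).toNat 'A' = 'A' := by
        by_contra hne
        have hmem := (hchr _ hp).mp hne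
        have := (hwin _ hmem).1
        omega
      rw [this]
    · rw [mod_negv he1 (by omega)]
      have hp : (idx - i + nm.length).toNat < nm.length := by omega
      rw [getElem?_eq_some_getD hp]
      have : nm.getD (idx - i + nm.length).toNat 'A' = 'A' := by
        by_contra hne
        have hmem := (hchr _ hp).mp hne
        have := hmax _ hmem
        omega
      rw [this]
  exact leftScan_aux nm idx L hLn _ hHit hcne hA (L - 1).toNat 1 (by omega) le_rfl hL1

def vsum (nm : List Char) (D : List Int) : Int :=
  (D.map (fun q => vcost (nm.getD q.toNat 'A'))).sum

structure CoupInv (nm : List Char) (idx lo hi : Int) (D : List Int) : Prop where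
  hn    : 1 ≤ nm.length
  hlo   : lo ≤ 0
  hhi   : 0 ≤ hi
  harc  : hi - lo < nm.length
  hidx  : idx = lo ∨ idx = hi
  hsort : List.Pairwise (· < ·) D
  hwin  : ∀ q ∈ D, hi < q ∧ q < lo + nm.length
  hchr  : ∀ j : Nat, j < nm.length → (j : Int) ≠ PySem.Int.mod idx nm.length →
            (nm.getD j 'A' ≠ 'A' ↔ (j : Int) ∈ D)

-- nm with one position set to 'A', everything else already 'A', is all-'A'
theorem set_replicate_of_allA {nm : List Char} {cur : Nat} (_hc : cur < nm.length)
    (h : ∀ j : Nat, j < nm.length → j ≠ cur → nm.getD j 'A' = 'A') :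
    nm.set cur 'A' = List.replicate (nm.set cur 'A').length 'A' := by
  show _ = List.replicate (nm.set cur 'A').length 'A' 
  apply List.ext_getElem (by simp)
  intro j h1 h2
  rw [List.getElem_replicate, List.getElem_set]
  split_ifs with hj
  · rfl
  · have hj' : j < nm.length := by simpa using h1
    have := h j hj' (by omega)
    rwa [List.getD_eq_getElem nm 'A' hj'] at this

theorem ne_replicate {nm : List Char} {q1 : Int} (_hq : 0 ≤ q1) (h1 : q1.toNat < nm.length)
    (h2 : nm.getD q1.toNat 'A' ≠ 'A') : ¬ (nm = List.replicate nm.length 'A') := by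
  intro h
  apply h2
  rw [h]
  unfold List.getD
  rw [List.getElem?_replicate]
  split <;> rfl

theorem set_self_of_getD {nm : List Char} {cur : Nat} (hc : cur < nm.length)
    (h : nm.getD cur 'A' = 'A') : nm.set cur 'A' = nm := by
  rw [List.getD_eq_getElem nm 'A' hc] at h
  rw [← h, List.set_getElem_self]

theorem getD_set_ne {nm : List Char} {cur j : Nat} (hj : j ≠ cur) :
    (nm.set cur 'A').getD j 'A' = nm.getD j 'A' := by
  unfold List.getD
  rw [List.getElem?_set_ne (by omega)]

theorem vsum_set {nm : List Char} {D : List Int} {cur : Nat}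
    (h : ∀ q ∈ D, 0 ≤ q ∧ q.toNat ≠ cur) :
    vsum (nm.set cur 'A') D = vsum nm D := by
  unfold vsum
  congr 1
  apply List.map_congr_left
  intro q hq
  rw [getD_set_ne (h q hq).2]

theorem main_lemma (fuel : Nat) :
    ∀ (nm : List Char) (D : List Int) (idx lo hi ansA : Int),
    CoupInv nm idx lo hi D → D.length + 1 ≤ fuel →
    loopA fuel nm idx ansA =
      some (loopB (nm.length : Int) D.length D (PySem.Int.mod idx (nm.length : Int))
              (ansA + vsum nm D +
               (if nm.getD (PySem.Int.mod idx (nm.length : Int)).toNat 'A' ≠ 'A'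
                then vcost (nm.getD (PySem.Int.mod idx (nm.length : Int)).toNat 'A') else 0))) := by
  induction fuel with
  | zero => intro nm D idx lo hi ansA _ hf; omega
  | succ fuel ih =>
    intro nm D idx lo hi ansA inv hf
    obtain ⟨hn, hlo, hhi, harc, hidx, hsort, hwin, hchr⟩ := inv
    have hidxlo : lo ≤ idx := by rcases hidx with h | h <;> omega
    have hidxhi : idx ≤ hi := by rcases hidx with h | h <;> omega
    have hin1 : -(nm.length : Int) ≤ idx := by omega
    have hin2 : idx < (nm.length : Int) := by omega
    set curI := PySem.Int.mod idx (nm.length : Int) with hcurdef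
    have hcurval : (0 ≤ idx ∧ curI = idx) ∨ (idx < 0 ∧ curI = idx + nm.length) := by
      by_cases h : 0 ≤ idx
      · exact Or.inl ⟨h, by rw [hcurdef, mod_small h hin2]⟩
      · exact Or.inr ⟨by omega, by rw [hcurdef, mod_negv hin1 (by omega)]⟩
    have hcur0 : 0 ≤ curI := by rcases hcurval with ⟨h0, h⟩ | ⟨h0, h⟩ <;> omega
    have hcurn : curI < (nm.length : Int) := by rcases hcurval with ⟨h0, h⟩ | ⟨h0, h⟩ <;> omega
    have hcurnatlt : curI.toNat < nm.length := by omega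
    have hcurnat : ((curI.toNat : Int)) = curI := Int.toNat_of_nonneg hcur0
    have hcurD : ∀ q ∈ D, q ≠ curI := by
      intro q hq
      have hw := hwin q hq
      rcases hcurval with ⟨h0, h⟩ | ⟨h0, h⟩ <;> rcases hidx with h2 | h2 <;> omega
    -- the value read by name[idx]
    have hget : PySem.List.pyGet? nm idx = some (nm.getD curI.toNat 'A') := by
      rw [pyGet_win hin1 hin2, ← hcurdef, getElem?_eq_some_getD hcurnatlt]
    set c := nm.getD curI.toNat 'A' with hcdef
    -- the cleared list
    set nm'' := nm.set curI.toNat 'A' with hnmdef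
    have hlen'' : nm''.length = nm.length := by rw [hnmdef, List.length_set]
    have hset : PySem.List.pySetD nm idx 'A' = nm'' := by
      rw [pySetD_win hin1 hin2, ← hcurdef, hnmdef]
    have hnm' : (if c ≠ 'A' then PySem.List.pySetD nm idx 'A' else nm) = nm'' := by
      split_ifs with hc
      · exact hset
      · rw [hnmdef, set_self_of_getD hcurnatlt (by simpa using hc)]
    have hchr'' : ∀ j : Nat, j < nm.length → (nm''.getD j 'A' ≠ 'A' ↔ (j : Int) ∈ D) := by
      intro j hj
      by_cases hje : j = curI.toNat
      · subst hje
        have hA : nm''.getD curI.toNat 'A' = 'A' := by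
          unfold List.getD
          rw [hnmdef, List.getElem?_set_self (by omega)]
          rfl
        constructor
        · intro hne; exact absurd hA hne
        · intro hmem; exact absurd hcurnat (hcurD _ hmem)
      · rw [hnmdef, getD_set_ne hje]
        exact hchr j hj (by omega)
    set vc := (if c ≠ 'A' then vcost c else 0) with hvcdef
    have hans' : (if c ≠ 'A' then ansA + vcost c else ansA) = ansA + vc := by
      rw [hvcdef]; split_ifs <;> omega
    match hD : D with
    | [] =>
      -- A finds the all-'A' board and stops
      have hrep : nm'' = List.replicate nm''.length 'A' := by
        apply set_replicate_of_allA hcurnatlt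
        intro j hj hje
        by_contra hne
        have := (hchr j hj (by omega)).mp hne
        simp at this
      simp only [loopA, hget]
      simp only [hnm', hans', if_pos hrep]
      simp [loopB, vsum, hvcdef]
    | q1 :: rest =>
      have hq1mem : q1 ∈ q1 :: rest := by simp
      have hq1w := hwin q1 hq1mem
      have hq1nat : ((q1.toNat : Int)) = q1 := Int.toNat_of_nonneg (by omega)
      have hq1lt : q1.toNat < nm.length := by omega
      have hnrep : ¬ (nm'' = List.replicate nm''.length 'A') := by
        have h2 : nm''.getD q1.toNat 'A' ≠ 'A' := by
          rw [(hchr'' q1.toNat hq1lt), hq1nat]; exact hq1mem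
        exact ne_replicate (by omega) (by rw [hlen'']; exact hq1lt) h2
      have hchr''' : ∀ j : Nat, j < nm''.length → (nm''.getD j 'A' ≠ 'A' ↔ (j : Int) ∈ q1 :: rest) := by
        rw [hlen'']; exact hchr''
      have hwin'' : ∀ q ∈ q1 :: rest, hi < q ∧ q < lo + nm''.length := by rw [hlen'']; exact hwin
      have hR : rightScanA nm'' idx (PySem.List.pyRange 1 (nm''.length : Int) 1) 1 = some (q1 - idx) := by
        apply rightScan_run nm'' idx lo hi q1 rest hlo hhi (by omega) hidx hsort hwin'' hchr'''
      set qm := (q1 :: rest).getLast (List.cons_ne_nil q1 rest) with hqmdef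
      have hqmmem : qm ∈ q1 :: rest := List.getLast_mem _
      have hqmw := hwin qm hqmmem
      have hqmnat : ((qm.toNat : Int)) = qm := Int.toNat_of_nonneg (by omega)
      have hqmlt : qm.toNat < nm.length := by omega
      have hL : leftScanA nm'' idx (PySem.List.pyRange 1 (nm''.length : Int) 1) 1 = some (idx - qm + nm''.length) := by
        exact leftScan_run nm'' idx lo hi q1 rest hlo hhi (by omega) hidx hsort hwin'' hchr'''
      simp only [loopA, hget]
      simp only [hnm', hans', hlen'']
      -- B's distances coincide with A's scan results
      have hr1 : 1 ≤ q1 - idx := by omega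
      have hrn : q1 - idx < (nm.length : Int) := by rcases hidx with h | h <;> omega
      have hl1 : 1 ≤ idx - qm + nm.length := by omega
      have hln : idx - qm + (nm.length : Int) < nm.length := by omega
      have hrB : PySem.Int.mod (q1 - curI) (nm.length : Int) = q1 - idx := by
        rcases hcurval with ⟨h0, h⟩ | ⟨h0, h⟩
        · rw [h]; exact mod_small (by omega) hrn
        · rw [h]
          have he : q1 - (idx + (nm.length : Int)) = (q1 - idx) - nm.length := by ring
          rw [he, mod_negv (by omega) (by omega)]; ring
      have hlB : PySem.Int.mod (curI - qm) (nm.length : Int) = idx - qm + nm.length := by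
        rcases hcurval with ⟨h0, h⟩ | ⟨h0, h⟩
        · rw [h, mod_negv (by omega) (by omega)]
        · rw [h]
          have he : idx + (nm.length : Int) - qm = idx - qm + nm.length := by ring
          rw [he, mod_small (by omega) hln]
      -- unfold one step of B
      have hstepB : loopB (nm.length : Int) (q1 :: rest).length (q1 :: rest) curI
            (ansA + vsum nm (q1 :: rest) + vc) =
          if idx - qm + nm.length ≥ q1 - idx then
            loopB (nm.length : Int) rest.length rest q1 (ansA + vsum nm (q1 :: rest) + vc + (q1 - idx))
          else
            loopB (nm.length : Int) rest.length ((q1 :: rest).dropLast) qm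
              (ansA + vsum nm (q1 :: rest) + vc + (idx - qm + nm.length)) := by
        show loopB _ (rest.length + 1) _ _ _ = _
        rw [loopB]
        simp only [← hqmdef, hrB, hlB]
      rw [hlen''] at hR hL hnrep
      rw [if_neg hnrep, hR, hL, hstepB]
      simp only [ge_iff_le]
      have hsplit : (q1 :: rest).dropLast ++ [qm] = q1 :: rest :=
        List.dropLast_append_getLast (List.cons_ne_nil q1 rest)
      have hlast : ∀ a ∈ (q1 :: rest).dropLast, a < qm := by
        have hs2 : List.Pairwise (· < ·) ((q1 :: rest).dropLast ++ [qm]) := by rw [hsplit]; exact hsort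
        intro a ha
        have := (List.pairwise_append.mp hs2).2.2 a ha qm (by simp)
        exact this
      have hvsumcons : vsum nm (q1 :: rest) = vcost (nm.getD q1.toNat 'A') + vsum nm rest := by
        simp [vsum]
      have hq1cur : q1.toNat ≠ curI.toNat := by
        have := hcurD q1 hq1mem; omega
      have hgq1 : nm''.getD q1.toNat 'A' = nm.getD q1.toNat 'A' := getD_set_ne hq1cur
      have hq1ne : nm''.getD q1.toNat 'A' ≠ 'A' := by
        rw [(hchr'' q1.toNat hq1lt), hq1nat]; exact hq1mem
      split_ifs with hbr
      · -- move right
        have hidx' : idx + (q1 - idx) = q1 := by ring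
        rw [hidx']
        have hvrest : vsum nm'' rest = vsum nm rest := by
          apply vsum_set
          intro q hq
          have hw := hwin q (by simp [hq])
          have hc := hcurD q (by simp [hq])
          constructor
          · omega
          · omega
        have inv' : CoupInv nm'' q1 lo q1 rest := by
          refine ⟨by omega, hlo, by omega, by rw [hlen'']; omega, Or.inr rfl,
                  (List.pairwise_cons.mp hsort).2, ?_, ?_⟩
          · intro q hq
            have := (List.pairwise_cons.mp hsort).1 q hq
            have := hwin q (by simp [hq])
            rw [hlen'']
            omega
          · intro j hj hjne
            have hmodq1 : PySem.Int.mod q1 (nm''.length : Int) = q1 := by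
              rw [hlen'']; exact mod_small (by omega) (by omega)
            rw [hmodq1] at hjne
            rw [hlen''] at hj
            rw [hchr'' j hj]
            constructor
            · intro hmem
              rcases List.mem_cons.mp hmem with h | h
              · exact absurd h hjne
              · exact h
            · intro hmem; exact List.mem_cons_of_mem _ hmem
        have ihr := ih nm'' rest q1 lo q1 (ansA + vc + (q1 - idx)) inv' (by simp at hf; omega)
        rw [hlen''] at ihr
        have hmodq1' : PySem.Int.mod q1 ((nm.length : Nat) : Int) = q1 := mod_small (by omega) (by omega)
        rw [hmodq1'] at ihr
        rw [ihr]
        congr 1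
        rw [if_pos (by rw [hgq1]; rw [hgq1] at hq1ne; exact hq1ne)]
        rw [hvrest, hgq1, hvsumcons]
        ring
      · -- move left
        have hidx' : idx - (idx - qm + (nm.length : Int)) = qm - nm.length := by ring
        rw [hidx']
        have hqmcur : qm.toNat ≠ curI.toNat := by
          have := hcurD qm hqmmem; omega
        have hgqm : nm''.getD qm.toNat 'A' = nm.getD qm.toNat 'A' := getD_set_ne hqmcur
        have hqmne : nm''.getD qm.toNat 'A' ≠ 'A' := by
          rw [(hchr'' qm.toNat hqmlt), hqmnat]; exact hqmmem
        have hvdl : vsum nm'' ((q1 :: rest).dropLast) = vsum nm ((q1 :: rest).dropLast) := by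
          apply vsum_set
          intro q hq
          have hqmem : q ∈ q1 :: rest := by rw [← hsplit]; exact List.mem_append_left _ hq
          have hw := hwin q hqmem
          have hc := hcurD q hqmem
          constructor
          · omega
          · omega
        have hvsumlast : vsum nm (q1 :: rest) = vsum nm ((q1 :: rest).dropLast) + vcost (nm.getD qm.toNat 'A') := by
          conv_lhs => rw [vsum, ← hsplit]
          rw [List.map_append, List.sum_append]
          simp [vsum]
        have inv' : CoupInv nm'' (qm - nm.length) (qm - nm.length) hi ((q1 :: rest).dropLast) := by
          refine ⟨by omega, by omega, hhi, by rw [hlen'']; omega, Or.inl rfl,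
                  List.Pairwise.sublist (List.dropLast_sublist _) hsort, ?_, ?_⟩
          · intro q hq
            have hqmem : q ∈ q1 :: rest := by rw [← hsplit]; exact List.mem_append_left _ hq
            have := hwin q hqmem
            have := hlast q hq
            rw [hlen'']
            omega
          · intro j hj hjne
            have hmodqm : PySem.Int.mod (qm - (nm.length : Int)) (nm''.length : Int) = qm := by
              rw [hlen'']
              rw [mod_negv (by omega) (by omega)]
              ring
            rw [hmodqm] at hjne
            rw [hlen''] at hj
            rw [hchr'' j hj]
            constructor
            · intro hmem
              rw [← hsplit] at hmem
              rcases List.mem_append.mp hmem with h | h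
              · exact h
              · simp at h; exact absurd h hjne
            · intro hmem
              rw [← hsplit]
              exact List.mem_append_left _ hmem
        have hdllen : ((q1 :: rest).dropLast).length = rest.length := by simp
        have ihr := ih nm'' ((q1 :: rest).dropLast) (qm - nm.length) (qm - nm.length) hi
          (ansA + vc + (idx - qm + nm.length)) inv' (by rw [hdllen]; simp at hf; omega)
        rw [hlen'', hdllen] at ihr
        have hmodqm' : PySem.Int.mod (qm - (nm.length : Int)) ((nm.length : Nat) : Int) = qm := by
          rw [mod_negv (by omega) (by omega)]; ring
        rw [hmodqm'] at ihr
        rw [ihr]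
        congr 1
        rw [if_pos (by rw [hgqm]; rw [hgqm] at hqmne; exact hqmne)]
        rw [hvdl, hgqm, hvsumlast]
        ring

theorem collectB_spec (nm : List Char) :
    ∀ (s : List Char) (i : Nat), s = nm.drop i →
    List.Pairwise (· < ·) (collectB s i).2 ∧
    (∀ q ∈ (collectB s i).2, (i : Int) ≤ q ∧ q < nm.length) ∧
    (∀ j : Nat, i ≤ j → j < nm.length → (nm.getD j 'A' ≠ 'A' ↔ (j : Int) ∈ (collectB s i).2)) ∧
    (collectB s i).1 = vsum nm (collectB s i).2 ∧
    (collectB s i).2.length ≤ s.length := by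
  intro s
  induction s with
  | nil =>
    intro i hs
    have hlen : nm.length ≤ i := by
      have := congrArg List.length hs
      simp at this
      omega
    refine ⟨by simp [collectB], by simp [collectB], ?_, by simp [collectB, vsum], by simp [collectB]⟩
    intro j h1 h2
    omega
  | cons c s' ih =>
    intro i hs
    have hi : i < nm.length := by
      by_contra h
      rw [List.drop_eq_nil_of_le (by omega)] at hs
      exact List.cons_ne_nil c s' hs
    have hgi : nm[i]? = some c := by
      have h0 : (nm.drop i)[0]? = some c := by rw [← hs]; rfl
      rwa [List.getElem?_drop, Nat.add_zero] at h0
    have hgid : nm.getD i 'A' = c := by unfold List.getD; rw [hgi]; rfl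
    have hs' : s' = nm.drop (i + 1) := by
      have := congrArg List.tail hs
      simpa [List.tail_drop] using this
    obtain ⟨ihsort, ihbnd, ihchr, ihsum, ihlen⟩ := ih (i + 1) hs'
    by_cases hc : c = 'A'
    · have hcb : collectB (c :: s') i = collectB s' (i + 1) := by
        simp [collectB, hc]
      rw [hcb]
      refine ⟨ihsort, ?_, ?_, ihsum, by simpa using Nat.le_succ_of_le ihlen⟩
      · intro q hq
        have := ihbnd q hq
        omega
      · intro j h1 h2
        rcases Nat.eq_or_lt_of_le h1 with h | h
        · subst h
          rw [hgid, hc]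
          simp only [ne_eq, not_true_eq_false, false_iff]
          intro hmem
          have := (ihbnd _ hmem).1
          omega
        · exact ihchr j (by omega) h2
    · have hcb : collectB (c :: s') i =
          (vcost c + (collectB s' (i + 1)).1, (i : Int) :: (collectB s' (i + 1)).2) := by
        simp [collectB, hc]
      rw [hcb]
      refine ⟨?_, ?_, ?_, ?_, by simpa using ihlen⟩
      · refine List.pairwise_cons.mpr ⟨?_, ihsort⟩
        intro q hq
        have := (ihbnd q hq).1
        omega
      · intro q hq
        rcases List.mem_cons.mp hq with h | h
        · subst h; constructor <;> [omega; exact_mod_cast hi]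
        · have := ihbnd q h
          omega
      · intro j h1 h2
        rcases Nat.eq_or_lt_of_le h1 with h | h
        · subst h
          rw [hgid]
          simp [hc]
        · have hne : (j : Int) ≠ (i : Int) := by omega
          rw [List.mem_cons]
          rw [ihchr j (by omega) h2]
          constructor
          · intro hmem; exact Or.inr hmem
          · intro hmem
            rcases hmem with h' | h'
            · exact absurd h' hne
            · exact h'
      · show vcost c + (collectB s' (i + 1)).1 = vsum nm ((i : Int) :: (collectB s' (i + 1)).2)
        rw [ihsum]
        simp only [vsum, List.map_cons, List.sum_cons, Int.toNat_natCast]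
        rw [show nm.getD i 'A' = c from hgid]

theorem solution_eq (name : String) (hpre : name.toList ≠ []) :
    solution name = solution_alt name := by
  set nm := name.toList with hnm
  have hn : 1 ≤ nm.length := by
    cases hnme : nm with
    | nil => exact absurd hnme hpre
    | cons a t => simp
  obtain ⟨hsort, hbnd, hchr, hsum, hlen⟩ := collectB_spec nm nm 0 (by simp)
  set p := collectB nm 0 with hp
  have hmod0 : PySem.Int.mod 0 (nm.length : Int) = 0 := mod_small le_rfl (by exact_mod_cast hn)
  by_cases hh : p.2.head? = some (0 : Int)
  · -- name[0] is not 'A': it is the head of the collected positions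
    obtain ⟨t, ht⟩ : ∃ t, p.2 = 0 :: t := by
      cases hc2 : p.2 with
      | nil => rw [hc2] at hh; simp at hh
      | cons a t =>
        rw [hc2] at hh
        simp at hh
        exact ⟨t, by rw [hh]⟩
    have hsort' : List.Pairwise (· < ·) t := by
      rw [ht] at hsort; exact (List.pairwise_cons.mp hsort).2
    have h0mem : (0 : Int) ∈ p.2 := by rw [ht]; simp
    have hg0 : nm.getD 0 'A' ≠ 'A' := by
      rw [hchr 0 le_rfl (by omega)]; exact_mod_cast h0mem
    have inv : CoupInv nm 0 0 0 t := by
      refine ⟨hn, le_rfl, le_rfl, by omega, Or.inl rfl, hsort', ?_, ?_⟩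
      · intro q hq
        have hb := hbnd q (by rw [ht]; exact List.mem_cons_of_mem _ hq)
        have := (List.pairwise_cons.mp (ht ▸ hsort)).1 q hq
        omega
      · intro j hj hjne
        rw [hmod0] at hjne
        rw [hchr j (by omega) hj, ht, List.mem_cons]
        constructor
        · intro h
          rcases h with h | h
          · exact absurd h hjne
          · exact h
        · intro h; exact Or.inr h
    have hfuel : t.length + 1 ≤ nm.length + 2 := by
      have := congrArg List.length ht
      simp at this
      omega
    have hmain := main_lemma (nm.length + 2) nm t 0 0 0 0 inv hfuel
    rw [hmod0] at hmain
    have hsum' : p.1 = vsum nm t + vcost (nm.getD 0 'A') := by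
      rw [hsum, ht]
      simp only [vsum, List.map_cons, List.sum_cons]
      have : ((0 : Int)).toNat = 0 := rfl
      rw [this]
      ring
    unfold solution solution_alt
    rw [← hnm, hmain]
    simp only [Option.getD_some, ← hp, ht, List.head?_cons, List.tail_cons, reduceIte]
    have h00 : (Int.toNat 0) = 0 := rfl
    rw [h00, if_pos hg0, hsum']
    ring_nf
  · -- name[0] is 'A'
    have h0nmem : (0 : Int) ∉ p.2 := by
      intro hmem
      cases hc2 : p.2 with
      | nil => rw [hc2] at hmem; simp at hmem
      | cons a t =>
        rw [hc2] at hmem hsort hbnd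
        have ha0 : 0 ≤ a := by
          have := (hbnd a (by simp)).1
          omega
        rcases List.mem_cons.mp hmem with h | h
        · rw [hc2] at hh; rw [← h] at hh; simp at hh
        · have := (List.pairwise_cons.mp hsort).1 0 h
          omega
    have hg0 : nm.getD 0 'A' = 'A' := by
      by_contra hne
      exact h0nmem ((hchr 0 le_rfl (by omega)).mp hne)
    have inv : CoupInv nm 0 0 0 p.2 := by
      refine ⟨hn, le_rfl, le_rfl, by omega, Or.inl rfl, hsort, ?_, ?_⟩
      · intro q hq
        have hb := hbnd q hq
        have : q ≠ 0 := by intro h; rw [h] at hq; exact h0nmem hq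
        omega
      · intro j hj hjne
        exact hchr j (by omega) hj
    have hfuel : p.2.length + 1 ≤ nm.length + 2 := by omega
    have hmain := main_lemma (nm.length + 2) nm p.2 0 0 0 0 inv hfuel
    rw [hmod0] at hmain
    unfold solution solution_alt
    rw [← hnm, hmain]
    simp only [Option.getD_some, ← hp, if_neg hh]
    have h00 : (Int.toNat 0) = 0 := rfl
    rw [h00, if_neg (by rw [hg0]; simp), hsum]
    ring_nf

-- ===== VERDICT (by name: the statement is the Claim_ definition above) =====
theorem solution_spec : Claim_equal_solution := by
  intro name _ hpre
  unfold Spec_solution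
  refine solution_eq name ?_
  intro h
  exact hpre (String.toList_eq_nil_iff.mp h)
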